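-- pv_equiv track=rewrite | github.com/PengJiaXi517/tagger | tag_functions/high_value_scene/bypass_junction_curb_tag.py | cal_path_dist_to_junction
-- ===== SOURCE A (Python) =====
-- from typing import Dict, List, Tuple, Union
--
-- def cal_path_dist_to_junction(
--     in_junction_id: List[int], labeled_junction_id: int
-- ) -> Tuple[float, float]:
--     path_distance_to_exit_lane = -1
--     path_distance_to_entry = -1
--     is_arrive_junction_entry = False
--
--     for i, junction_id in enumerate(in_junction_id):
--         if junction_id is not None and junction_id == labeled_junction_id:
--             path_distance_to_exit_lane = i
--             if not is_arrive_junction_entry: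
--                 is_arrive_junction_entry = True
--                 path_distance_to_entry = i - 1
--
--     return path_distance_to_entry, path_distance_to_exit_lane
-- ===== SOURCE B (Python) =====
-- def cal_path_dist_to_junction(in_junction_id, labeled_junction_id):
--     path_distance_to_entry = -1
--     for i, v in enumerate(in_junction_id):
--         if v is not None and v == labeled_junction_id:
--             path_distance_to_entry = i - 1
--             break
--     path_distance_to_exit_lane = -1
--     for j, v in reversed(list(enumerate(in_junction_id))):
--         if v is not None and v == labeled_junction_id:
--             path_distance_to_exit_lane = j
--             break
--     return path_distance_to_entry, path_distance_to_exit_lane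
-- ===== Notes on version B (the rewrite author's own statement) =====
-- stated objective: alternative
-- what changed: A's single pass carrying an (entry, exit, arrived-flag) state is replaced by two targeted early-exit passes: a forward scan with break for the entry index and a reverse scan with break for the exit index.
import Mathlib
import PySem

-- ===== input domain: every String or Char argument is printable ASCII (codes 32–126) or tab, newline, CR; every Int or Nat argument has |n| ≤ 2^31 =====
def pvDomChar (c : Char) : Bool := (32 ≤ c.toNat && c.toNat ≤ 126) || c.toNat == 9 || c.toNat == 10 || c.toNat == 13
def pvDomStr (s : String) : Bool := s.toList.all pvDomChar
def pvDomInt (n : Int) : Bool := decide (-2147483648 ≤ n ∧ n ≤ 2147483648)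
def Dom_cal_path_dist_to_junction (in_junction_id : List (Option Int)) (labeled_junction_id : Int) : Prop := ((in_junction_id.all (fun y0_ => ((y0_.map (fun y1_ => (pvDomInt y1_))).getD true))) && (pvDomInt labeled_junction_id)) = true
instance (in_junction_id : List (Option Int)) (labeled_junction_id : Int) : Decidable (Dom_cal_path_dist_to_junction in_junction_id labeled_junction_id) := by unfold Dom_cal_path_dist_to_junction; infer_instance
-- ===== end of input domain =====

-- B replaces A's single stateful flag-driven scan by two targeted early-exit passes
-- (a forward scan for the entry index, a reverse scan for the exit index): alternative decomposition.


-- ===== PORT A =====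
-- A: one pass over enumerate, state = (entry, exit_lane, arrived-flag)
def cal_path_dist_to_junction (in_junction_id : List (Option Int)) (labeled_junction_id : Int) : Int × Int :=
  let st := (PySem.List.enumerate in_junction_id).foldl
    (fun (s : Int × Int × Bool) (p : Int × Option Int) =>
      match p.2 with
      | some v =>
          if v = labeled_junction_id then
            (if s.2.2 then s.1 else p.1 - 1, p.1, true)
          else s
      | none => s)
    (-1, -1, false)
  (st.1, st.2.1)

-- ===== PORT B =====
-- forward pass with break: entry = first matching index - 1, default -1
def pvFirstEntry (t : Int) : List (Int × Option Int) → Int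
  | [] => -1
  | (i, some v) :: rest => if v = t then i - 1 else pvFirstEntry t rest
  | (_, none) :: rest => pvFirstEntry t rest

-- reverse pass with break: exit = first matching index of the reversed enumeration, default -1
def pvLastExit (t : Int) : List (Int × Option Int) → Int
  | [] => -1
  | (j, some v) :: rest => if v = t then j else pvLastExit t rest
  | (_, none) :: rest => pvLastExit t rest

def cal_path_dist_to_junction_alt (in_junction_id : List (Option Int)) (labeled_junction_id : Int) : Int × Int :=
  (pvFirstEntry labeled_junction_id (PySem.List.enumerate in_junction_id),
   pvLastExit labeled_junction_id (PySem.List.enumerate in_junction_id).reverse)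

-- ===== PRECONDITION & SPEC =====
def Spec_cal_path_dist_to_junction (in_junction_id : List (Option Int)) (labeled_junction_id : Int) (out : Int × Int) : Prop := out = cal_path_dist_to_junction_alt in_junction_id labeled_junction_id
instance (in_junction_id : List (Option Int)) (labeled_junction_id : Int) (out : Int × Int) : Decidable (Spec_cal_path_dist_to_junction in_junction_id labeled_junction_id out) := by unfold Spec_cal_path_dist_to_junction; infer_instance

-- ===== CLAIM (what is proved, stated in full; the proofs are below) =====
def Claim_equal_cal_path_dist_to_junction : Prop := ∀ (in_junction_id : List (Option Int)) (labeled_junction_id : Int), Dom_cal_path_dist_to_junction in_junction_id labeled_junction_id → Spec_cal_path_dist_to_junction in_junction_id labeled_junction_id (cal_path_dist_to_junction in_junction_id labeled_junction_id)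

-- ===== LEMMAS AND PROOFS =====

-- A's loop body, abbreviated
def pvStepA (t : Int) (s : Int × Int × Bool) (p : Int × Option Int) : Int × Int × Bool :=
  match p.2 with
  | some v => if v = t then (if s.2.2 then s.1 else p.1 - 1, p.1, true) else s
  | none => s

-- "last matching index, else the accumulator" as a left fold
def pvLastx (t : Int) (x : Int) (l : List (Int × Option Int)) : Int :=
  l.foldl (fun acc p => match p.2 with | some v => if v = t then p.1 else acc | none => acc) x

theorem pvLastx_cons (t x : Int) (a : Int × Option Int) (l : List (Int × Option Int)) :
    pvLastx t x (a :: l) =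
      pvLastx t (match a.2 with | some v => if v = t then a.1 else x | none => x) l := by
  cases a with
  | mk i o => cases o <;> simp [pvLastx, List.foldl]

-- once arrived, A's fold only updates the exit component
theorem pvFoldA_arrived (t : Int) (l : List (Int × Option Int)) (e x : Int) :
    l.foldl (pvStepA t) (e, x, true) = (e, pvLastx t x l, true) := by
  induction l generalizing x with
  | nil => simp [pvLastx]
  | cons a l ih =>
      cases a with
      | mk i o =>
        cases o with
        | none => simp [List.foldl, pvStepA, pvLastx_cons, ih]
        | some v =>
            by_cases h : v = t <;>
              simp [List.foldl, pvStepA, pvLastx_cons, h, ih]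

-- from the initial state, A's fold computes (first-match−1, last-match)
theorem pvFoldA_char (t : Int) (l : List (Int × Option Int)) :
    l.foldl (pvStepA t) (-1, -1, false) =
      (pvFirstEntry t l, pvLastx t (-1) l,
        (l.foldl (pvStepA t) (-1, -1, false)).2.2) := by
  induction l with
  | nil => rfl
  | cons a l ih =>
      cases a with
      | mk i o =>
        cases o with
        | none => simpa [List.foldl, pvStepA, pvFirstEntry, pvLastx_cons] using ih
        | some v =>
            by_cases h : v = t
            · simp [List.foldl, pvStepA, pvFirstEntry, pvLastx_cons, h, pvFoldA_arrived]
            · simpa [List.foldl, pvStepA, pvFirstEntry, pvLastx_cons, h] using ih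

-- the reverse pass computes the same "last match" as the left fold
theorem pvLastExit_reverse_append (t : Int) (l q : List (Int × Option Int)) :
    pvLastExit t (l.reverse ++ q) = pvLastx t (pvLastExit t q) l := by
  induction l generalizing q with
  | nil => simp [pvLastx]
  | cons a l ih =>
      cases a with
      | mk i o =>
        have : (((i, o) :: l).reverse ++ q) = l.reverse ++ ((i, o) :: q) := by
          simp
        rw [this, ih, pvLastx_cons]
        cases o with
        | none => simp [pvLastExit]
        | some v => by_cases h : v = t <;> simp [pvLastExit, h]

theorem pvLastExit_reverse (t : Int) (l : List (Int × Option Int)) :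
    pvLastExit t l.reverse = pvLastx t (-1) l := by
  have := pvLastExit_reverse_append t l []
  simpa [pvLastExit] using this

-- ===== VERDICT (by name: the statement is the Claim_ definition above) =====
theorem cal_path_dist_to_junction_spec : Claim_equal_cal_path_dist_to_junction := by
  intro xs t _
  unfold Spec_cal_path_dist_to_junction cal_path_dist_to_junction cal_path_dist_to_junction_alt
  have hA := pvFoldA_char t (PySem.List.enumerate xs)
  have hfold : (fun (s : Int × Int × Bool) (p : Int × Option Int) =>
      match p.2 with
      | some v => if v = t then (if s.2.2 then s.1 else p.1 - 1, p.1, true) else s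
      | none => s) = pvStepA t := by
    funext s p; rfl
  simp only [hfold]
  rw [hA, pvLastExit_reverse]
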